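/- GENERATED by mk_final_copies.py from the proof of the farm's unit `start_decoder.R3` (farm:start_decoder.R3.1: Proof.lean) as the
   re-elaboration sweep compiled it — do not edit. -/
/-
  start_decoder.R3 (0x1159f8 – 0x115b33, stb_vorbis_fixed.c:4045–4054): `r = f->residue_config + i`; residue_types[i], begin, end,
  part_size, classifications, classbook and their three tests. Six calls of `get_bits`, three of `error`, nine check sites.

  ONE LEMMA PER RETURNED CALLEE STATE (`stage0 … stage6`), chained by `ReachVia.trans`. Between two stages the state carries
  `Stage` (work/Lemmas.lean: the loop invariant `ResLoop` at that address, `rbp = f`, `r14d = i`, `rbx = r`) and the facts about the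
  fields of record `i` stored so far, as raw reads (`mem.u16 (f + 324 + 2i)`, `mem.u32 r` …). Every stage: the prelude (where `*f`
  and the block of `residue_config` are: `geo`, `lives`), one walk, the check goals by `LiveIn.accSmall`, the callee's precondition by
  `getBitsPre` / `errorPre` (`Bits` over the stage's own stores: `bitsOwn`), and at the returned state THE CARRY LEMMA `carry2`
  (work/Lemmas.lean) over the stage's own stores (`hsame1`, by `u_same`) and the callee's footprint (`w_same`).
-/
import Asan.CheckWalk
import Vorbis.Spec.Units.start_decoder_R3
import Vorbis.Spec.Worked.start_decoder_R3_Lemmas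
open X86 X86.User Asan Vorbis Vorbis.Spec Vorbis.Spec.StartDecoder

set_option maxRecDepth 4000
set_option maxHeartbeats 4000000

namespace Vorbis.Spec.start_decoder_R3

/-- **0x1159f8 (cut239, the entry) … 0x115a22 (cut240)**, stb_vorbis_fixed.c:4045–4046: the checked load of `f->residue_config`,
`rbx = r = residue_config + (i << 5)`, `get_bits(f, 16)`. -/
theorem stage0 (Lay : Layout) (hLay : Lay.hi = 0x1000000) (μ : Microarch) (hμ : UserX.MicroOK μ) (u₀ : State)
    (hcode : HasCodeNat Lay u₀ Vorbis.L.start_decoder.entry Vorbis.Code.code_start_decoder.nat Vorbis.L.start_decoder.size)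
    (h_load8 : Asan.SmallCheck Lay μ Vorbis.WayInv (Vorbis.CodeOK u₀) [.rax, .rcx, .rdx] 8 Vorbis.L.__asan_load8_noabort.entry)
    (h_get_bits : ∀ (others : List Obj) (frames : List (Nat × FrameLayout)) (Blk : Block → Prop) (len : Nat), Calls Lay μ Vorbis.WayInv (Vorbis.conv u₀) Vorbis.L.get_bits.entry (Vorbis.Spec.get_bits.spec others frames Blk len))
    (g : Ghost) (i : Nat) (A6 A6c : Arena) (A : Arena × List Obj) (v : State) (hat : BodyR3 u₀ g i A6 A6c A v) :
    ReachVia Lay μ WayInv v (fun w => Stage u₀ g Vorbis.L.start_decoder.cut240 i A6 A6c A w ∧ w.reg .r12 = addr i) := by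
  have hloop := hat.loop
  have hfr := hloop.frame
  have he := hfr.entry
  v_entry he
  simp only [depth] at he_room he_stack
  simp only [UInt64.reduceOfNat, Nat.reduceAdd] at he_stack
  have hgb := h_get_bits A.2 g.frames' (g.Blk A) g.len
  have hlt := hat.lt
  -- where things are
  have hC := hloop.res.R2.1.mono hloop.res.ext6c
  obtain ⟨g1, g2, g3, g4, g5, g6, g7, g8, g9, g10, g11, g12, g13, g14⟩ := geo hfr hloop.hand hloop.mid.env.ok hloop.mid.arena hC
  simp only [voff] at g10 g11 g12 g13 g14
  obtain ⟨hLf, hLc⟩ := lives hloop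
  have hR1 := hloop.res.R1
  have hRA : g.RA = (g.e.reg .rsp).toNat := rfl
  have hR : g.R = (g.e.reg .rsp).toNat - 1480 := rfl
  have hsteady := rsp_steady g (by omega)
  have hshadow := hfr.shadow
  have hresAt : resAt g v.mem i = stb_vorbis.residue_config v.mem g.f + 32 * i := rfl
  generalize hF : g.f = F at *
  generalize hc : stb_vorbis.residue_config v.mem F = c at *
  generalize hn : (stb_vorbis.residue_count v.mem F).toNat = n at *
  rw [hRA] at g1 g3 g4 g7
  have hi64 : i < 64 := by omega
  have w_rip := hfr.rip
  have w_rsp : v.reg .rsp = g.e.reg .rsp - 1480 := by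
    rw [hfr.rsp]
    exact hsteady
  have w_rbp := hat.rbp
  have w_r14 := hat.r14
  rw [hF] at w_rbp
  have c_rsp := w_rsp
  have c_rbp := w_rbp
  have c_r14 := w_r14
  have w_eq : Mem.EqOn Vorbis.L.textLo Vorbis.L.textHi u₀.mem v.mem := hfr.code
  have hdf : v.flags .df = false := (show abiInv _ from hfr.inv).1
  have hmx : v.mxcsr &&& 0x1F80 = 0x1F80 := (show abiInv _ from hfr.inv).2
  have hsse := Vorbis.sseOK_of_abiInv hfr.inv
  have hsx := sext_addr i (by omega)
  clear g8 g13
  have r1 : v.mem.readLE (addr F + 0x1c8) 8 = c := by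
    rw [← hc]
    simp only [vfield, vacc, voff]
  u_walk hcode [hμ.vendor] until [Vorbis.L.start_decoder.cut240] span [Vorbis.L.textLo, Vorbis.L.textHi] side (v_side)
  case check_1159ff =>
    have hun : ShadowUntouched v.mem s_1159ff.mem := by v_untouched
    have e := toNat_addr_add F 456 456 rfl (by omega)
    exact hLf.accSmall hshadow hun _ 8 (by decide) (by omega) (by omega)
  case call_inv => v_inv
  case pre_115a1d =>
    have hun : ShadowUntouched v.mem s_115a1d.mem := by v_untouched
    have eF : (addr F).toNat = F := toNat_addr F (by omega)
    have hsame1 : Mem.SameExcept [⟨(g.e.reg .rsp).toNat - 1488, (g.e.reg .rsp).toNat - 1480⟩] v.mem s_115a1d.mem := by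
      rw [w_mem]
      u_same
    have hws1 : ∀ w, w ∈ [(⟨(g.e.reg .rsp).toNat - 1488, (g.e.reg .rsp).toNat - 1480⟩ : Span)] →
        SpanOwn g (resAt g v.mem i) i w := by
      intro w hw
      rw [List.mem_singleton] at hw
      subst hw
      left
      rw [hRA, hR]
      simp only []
      omega
    have hb := bitsOwn hloop (by rw [hF]; exact hlt) hsame1 hws1
    refine getBitsPre hloop ?_ hun ?_ hb ?_
    · rw [w_rsp, hR]
      u_omega
    · rw [w_rdi, hF]
      exact eF
    · rw [bitsArg_def, w_rsi]
      decide
  case cont =>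
    simp only [X86.User.Spec.footprint, vspec, w_rsp_115a1d, w_rdi_115a1d] at w_same
    have eF : (addr F).toNat = F := toNat_addr F (by omega)
    have eSP : (g.e.reg .rsp - 1488).toNat = (g.e.reg .rsp).toNat - 1488 := by u_omega
    rw [eF, eSP] at w_same
    have hsame1 : Mem.SameExcept [⟨(g.e.reg .rsp).toNat - 1488, (g.e.reg .rsp).toNat - 1480⟩] v.mem s_115a1d.mem := by
      rw [w_mem_115a1d]
      u_same
    have hws1 : ∀ w, w ∈ [(⟨(g.e.reg .rsp).toNat - 1488, (g.e.reg .rsp).toNat - 1480⟩ : Span)] →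
        SpanOwn g (resAt g v.mem i) i w := by
      intro w hw
      rw [List.mem_singleton] at hw
      subst hw
      left
      rw [hRA, hR]
      simp only []
      omega
    have hpost : GetBitsSpecPost (g.Blk A) g.len (s_115a1d.reg .rdi).toNat (bitsArg s_115a1d) s_115a1d s_115a1dr := w_post
    have hbits : Bits (g.Blk A) g.len s_115a1dr.mem g.f := by
      have := hpost.bits.bits
      rw [w_rdi_115a1d, eF, ← hF] at this
      exact this
    have hcar := carry2 (pc' := Vorbis.L.start_decoder.cut240) hloop (by rw [hF]; exact hlt) hsame1 w_same hws1 ?hws2 hbits w_rip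
      (by rw [hsteady]; exact w_rsp) (Vorbis.conv_code_eqOn w_code) w_inv
    case hws2 =>
      intro w hw
      simp only [List.mem_cons, List.mem_nil_iff, or_false] at hw
      unfold SpanCallee
      rw [hRA, hR, hF]
      rcases hw with rfl | rfl | rfl | rfl | rfl | rfl <;> simp only [] <;> omega
    refine ReachVia.done ⟨⟨hcar.loop, ?rbp, ?r14, ?lt, ?rbx⟩, ?r12⟩
    case rbp =>
      rw [w_kept .rbp rfl]
      exact hat.rbp
    case r14 =>
      rw [w_kept .r14 rfl]
      exact hat.r14
    case lt =>
      rw [hcar.count]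
      exact hat.lt
    case r12 =>
      rw [w_r12, hsx]
    case rbx =>
      have hrd : (v.mem.writeLE (g.e.reg .rsp - 1488) 8 1137156).readLE (addr F + 456) 8 = c := by
        rw [← r1]
        exact Mem.readLE_writeLE_disj (L := Lay) _ _ w_has_1159ff w_acc_1159ff (by clear g11 g12; u_omega)
      have e1 : resAt g s_115a1dr.mem i = c + 32 * i := by
        unfold resAt stb_vorbis.residue_config_at
        rw [hcar.config, hF, hc]
        rfl
      rw [w_rbx, hsx, hrd, e1]
      exact shl5_add i c hi64 (by omega)

/-- **0x115a22 (cut240) … 0x115a66 (cut242) ∨ the epilogue**, lines 4046–4048: the checked store of `residue_types[i]`, the test `> 2`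
(`error` → 0x113b22), `get_bits(f, 24)`. -/
theorem stage1 (Lay : Layout) (hLay : Lay.hi = 0x1000000) (μ : Microarch) (hμ : UserX.MicroOK μ) (u₀ : State)
    (hcode : HasCodeNat Lay u₀ Vorbis.L.start_decoder.entry Vorbis.Code.code_start_decoder.nat Vorbis.L.start_decoder.size)
    (h_get_bits : ∀ (others : List Obj) (frames : List (Nat × FrameLayout)) (Blk : Block → Prop) (len : Nat), Calls Lay μ Vorbis.WayInv (Vorbis.conv u₀) Vorbis.L.get_bits.entry (Vorbis.Spec.get_bits.spec others frames Blk len))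
    (h_store2 : Asan.SmallCheck Lay μ Vorbis.WayInv (Vorbis.CodeOK u₀) [.rax, .rcx, .rdx] 2 Vorbis.L.__asan_store2_noabort.entry)
    (h_error : ∀ (others : List Obj) (frames : List (Nat × FrameLayout)), Calls Lay μ Vorbis.WayInv (Vorbis.conv u₀) Vorbis.L.error.entry (Vorbis.Spec.error.spec others frames))
    (g : Ghost) (i : Nat) (A6 A6c : Arena) (A : Arena × List Obj) (v : State)
    (hst : Stage u₀ g Vorbis.L.start_decoder.cut240 i A6 A6c A v) (hr12 : v.reg .r12 = addr i) :
    ReachVia Lay μ WayInv v (fun w => (Stage u₀ g Vorbis.L.start_decoder.cut242 i A6 A6c A w ∧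
      w.mem.u16 (g.f + 324 + 2 * i) ≤ 2 ∧ (w.reg .rax).toNat < 2 ^ 24) ∨ AtERR u₀ g w) := by
  have hloop := hst.loop
  have hfr := hloop.frame
  have he := hfr.entry
  v_entry he
  simp only [depth] at he_room he_stack
  simp only [UInt64.reduceOfNat, Nat.reduceAdd] at he_stack
  have hgb := h_get_bits A.2 g.frames' (g.Blk A) g.len
  have herr := h_error A.2 g.frames'
  have hlt := hst.lt
  -- where things are
  have hC := hloop.res.R2.1.mono hloop.res.ext6c
  obtain ⟨g1, g2, g3, g4, g5, g6, g7, g8, g9, g10, g11, g12, g13, g14⟩ := geo hfr hloop.hand hloop.mid.env.ok hloop.mid.arena hC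
  simp only [voff] at g10 g11 g12 g13 g14
  obtain ⟨hLf, hLc⟩ := lives hloop
  have hR1 := hloop.res.R1
  have hRA : g.RA = (g.e.reg .rsp).toNat := rfl
  have hR : g.R = (g.e.reg .rsp).toNat - 1480 := rfl
  have hsteady := rsp_steady g (by omega)
  have hshadow := hfr.shadow
  have hresAt : resAt g v.mem i = stb_vorbis.residue_config v.mem g.f + 32 * i := rfl
  have w_rbx := hst.rbx
  rw [hresAt] at w_rbx
  generalize hF : g.f = F at *
  generalize hc : stb_vorbis.residue_config v.mem F = c at *
  generalize hn : (stb_vorbis.residue_count v.mem F).toNat = n at *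
  rw [hRA] at g1 g3 g4 g7
  have hi64 : i < 64 := by omega
  have w_rip := hfr.rip
  have w_rsp : v.reg .rsp = g.e.reg .rsp - 1480 := by
    rw [hfr.rsp]
    exact hsteady
  have w_rbp := hst.rbp
  have w_r14 := hst.r14
  have w_r12 := hr12
  rw [hF] at w_rbp
  have c_rsp := w_rsp
  have c_rbp := w_rbp
  have c_r14 := w_r14
  have c_r12 := w_r12
  have c_rbx := w_rbx
  have w_eq : Mem.EqOn Vorbis.L.textLo Vorbis.L.textHi u₀.mem v.mem := hfr.code
  have hdf : v.flags .df = false := (show abiInv _ from hfr.inv).1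
  have hmx : v.mxcsr &&& 0x1F80 = 0x1F80 := (show abiInv _ from hfr.inv).2
  have hsse := Vorbis.sseOK_of_abiInv hfr.inv
  clear g8 g13
  have hFt : 0x119d40 ≤ F := (hLf.where_ hshadow hfr.offText (by decide)).1
  have hct : 0x119d40 ≤ c := (hLc.where_ hshadow hfr.offText (by omega)).1
  obtain ⟨z, hz⟩ : ∃ z, v.reg .rax = z := ⟨_, rfl⟩
  have c_rax := hz
  have k1 : (addr i + 160).toNat = i + 160 := toNat_addr_add i 160 160 rfl (by omega)
  have k2 : ((addr i + 160) * 2).toNat = 2 * i + 320 := by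
    have e2w : (2 : Word).toNat = 2 := rfl
    rw [UInt64.toNat_mul, k1, e2w]
    omega
  have k3 : (addr i + 160 + (addr i + 160)).toNat = 2 * i + 320 := by
    rw [UInt64.toNat_add, k1]
    omega
  have e4w : (4 : Word).toNat = 4 := rfl
  have e1n : (addr F + (addr i + 160) * 2 + 4).toNat = F + 324 + 2 * i := by
    rw [UInt64.toNat_add, toNat_addr_add F _ _ k2 (by omega), e4w]
    omega
  have e2n : (addr F + (addr i + 160 + (addr i + 160)) + 4).toNat = F + 324 + 2 * i := by
    rw [UInt64.toNat_add, toNat_addr_add F _ _ k3 (by omega), e4w]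
    omega
  have e1 := eq_addr _ _ e1n
  have e2 := eq_addr _ _ e2n
  u_walk hcode [hμ.vendor] until [Vorbis.L.start_decoder.cut242, Vorbis.L.start_decoder.cut241] span [Vorbis.L.textLo, Vorbis.L.textHi] side (v_side)
  case check_115a35 =>
    have hun : ShadowUntouched v.mem s_115a35.mem := by v_untouched
    exact hLf.accSmall hshadow hun _ 2 (by decide) (by rw [e2n]; omega) (by rw [e2n]; omega)
  case call_inv => v_inv
  case pre_115a61 =>
    have hun : ShadowUntouched v.mem s_115a61.mem := by v_untouched
    have eF : (addr F).toNat = F := toNat_addr F (by omega)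
    rw [e1] at w_mem
    have hsame1 : Mem.SameExcept [⟨(g.e.reg .rsp).toNat - 1488, (g.e.reg .rsp).toNat - 1480⟩,
        ⟨F + 324 + 2 * i, F + 326 + 2 * i⟩] v.mem s_115a61.mem := by
      rw [w_mem]
      u_same
    have hws1 : ∀ w, w ∈ [(⟨(g.e.reg .rsp).toNat - 1488, (g.e.reg .rsp).toNat - 1480⟩ : Span),
        ⟨F + 324 + 2 * i, F + 326 + 2 * i⟩] → SpanOwn g (resAt g v.mem i) i w := by
      intro w hw
      simp only [List.mem_cons, List.mem_nil_iff, or_false] at hw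
      unfold SpanOwn
      rw [hRA, hR, hF]
      rcases hw with rfl | rfl <;> simp only [] <;> omega
    have hb := bitsOwn hloop (by rw [hF]; exact hlt) hsame1 hws1
    refine getBitsPre hloop ?_ hun ?_ hb ?_
    · rw [w_rsp, hR]
      u_omega
    · rw [w_rdi, hF]
      exact eF
    · rw [bitsArg_def, w_rsi]
      decide
  case call_inv => v_inv
  case pre_115a4f =>
    have hun : ShadowUntouched v.mem s_115a4f.mem := by v_untouched
    have eF : (addr F).toNat = F := toNat_addr F (by omega)
    refine errorPre hloop ?_ hun ?_
    · rw [w_rsp, hR]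
      u_omega
    · rw [w_rdi, hF]
      exact eF
  · -- 0x115a66 = cut242: `get_bits(f, 24)` returned
    simp only [X86.User.Spec.footprint, vspec, w_rsp_115a61, w_rdi_115a61] at w_same
    have eF : (addr F).toNat = F := toNat_addr F (by omega)
    have eSP : (g.e.reg .rsp - 1488).toNat = (g.e.reg .rsp).toNat - 1488 := by u_omega
    rw [eF, eSP] at w_same
    rw [e1] at w_mem_115a61
    have hsame1 : Mem.SameExcept [⟨(g.e.reg .rsp).toNat - 1488, (g.e.reg .rsp).toNat - 1480⟩,
        ⟨F + 324 + 2 * i, F + 326 + 2 * i⟩] v.mem s_115a61.mem := by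
      rw [w_mem_115a61]
      u_same
    have hws1 : ∀ w, w ∈ [(⟨(g.e.reg .rsp).toNat - 1488, (g.e.reg .rsp).toNat - 1480⟩ : Span),
        ⟨F + 324 + 2 * i, F + 326 + 2 * i⟩] → SpanOwn g (resAt g v.mem i) i w := by
      intro w hw
      simp only [List.mem_cons, List.mem_nil_iff, or_false] at hw
      unfold SpanOwn
      rw [hRA, hR, hF]
      rcases hw with rfl | rfl <;> simp only [] <;> omega
    have hws2 := getBits_spans g (g.e.reg .rsp).toNat F hRA hR hF g3
    have hpost : GetBitsSpecPost (g.Blk A) g.len (s_115a61.reg .rdi).toNat (bitsArg s_115a61) s_115a61 s_115a61r := w_post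
    have hbits : Bits (g.Blk A) g.len s_115a61r.mem g.f := by
      have := hpost.bits.bits
      rw [w_rdi_115a61, eF, ← hF] at this
      exact this
    have hcar := carry2 (pc' := Vorbis.L.start_decoder.cut242) hloop (by rw [hF]; exact hlt) hsame1 w_same hws1 hws2 hbits w_rip
      (by rw [hsteady]; exact w_rsp) (Vorbis.conv_code_eqOn w_code) w_inv
    refine ReachVia.done (Or.inl ⟨⟨hcar.loop, ?rbp, ?r14, ?lt, ?rbx⟩, ?ty, ?rax⟩)
    case rbp =>
      rw [w_kept .rbp rfl]
      exact hst.rbp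
    case r14 =>
      rw [w_kept .r14 rfl]
      exact hst.r14
    case lt =>
      rw [hcar.count]
      exact hst.lt
    case rbx =>
      have e1 : resAt g s_115a61r.mem i = resAt g v.mem i := by
        unfold resAt stb_vorbis.residue_config_at
        rw [hcar.config]
      rw [w_kept .rbx rfl, e1]
      exact hst.rbx
    case rax =>
      have hr := hpost.bits.result.2
      have e24 : bitsArg s_115a61 = 24 := by
        rw [bitsArg_def, w_rsi_115a61]
        decide
      rw [e24] at hr
      exact hr (by decide)
    case ty =>
      have hk := keepCallee hloop w_same hws2 (F + 324 + 2 * i) (F + 326 + 2 * i) (by rw [hF]; exact Or.inl ⟨by omega, by omega⟩)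
      rw [hk.u16 _ (Nat.le_refl _) (by omega) (by omega), w_mem_115a61]
      rw [Mem.u16_writeLE _ _ _ _ _ (by u_omega) (by omega) (by clear g11 g12; u_omega), Mem.u16_writeLE_same]
      omega
  · -- 0x115a54 = cut241: `error(f, VORBIS_invalid_setup)` returned; `jmp 113b22`
    simp only [X86.User.Spec.footprint, vspec, w_rsp_115a4f, w_rdi_115a4f] at w_same
    have eF : (addr F).toNat = F := toNat_addr F (by omega)
    have eSP : (g.e.reg .rsp - 1488).toNat = (g.e.reg .rsp).toNat - 1488 := by u_omega
    rw [eF, eSP] at w_same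
    rw [e1] at w_mem_115a4f
    have hsame1 : Mem.SameExcept [⟨(g.e.reg .rsp).toNat - 1488, (g.e.reg .rsp).toNat - 1480⟩,
        ⟨F + 324 + 2 * i, F + 326 + 2 * i⟩] v.mem s_115a4f.mem := by
      rw [w_mem_115a4f]
      u_same
    have hws1 : ∀ w, w ∈ [(⟨(g.e.reg .rsp).toNat - 1488, (g.e.reg .rsp).toNat - 1480⟩ : Span),
        ⟨F + 324 + 2 * i, F + 326 + 2 * i⟩] → SpanOwn g (resAt g v.mem i) i w := by
      intro w hw
      simp only [List.mem_cons, List.mem_nil_iff, or_false] at hw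
      unfold SpanOwn
      rw [hRA, hR, hF]
      rcases hw with rfl | rfl <;> simp only [] <;> omega
    have hws2 := error_spans g (g.e.reg .rsp).toNat F hRA hR hF g3
    have hb1 := bitsOwn hloop (by rw [hF]; exact hlt) hsame1 hws1
    have hbits : Bits (g.Blk A) g.len s_115a4fr.mem g.f := by
      apply bitsError hfr hloop.hand hloop.mid.env.ok hloop.mid.arena hC hb1 w_same
      intro w hw
      have := hws2 w hw
      unfold SpanCallee at this
      simp only [List.mem_cons, List.mem_nil_iff, or_false] at hw
      rw [hRA, hR, hF]
      rcases hw with rfl | rfl <;> simp only [] <;> omega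
    have hpost : s_115a4fr.reg .rax = 0 := w_post.1
    have w_eq := Vorbis.conv_code_eqOn w_code
    have hdfr : s_115a4fr.flags .df = false := (show X86.User.abiInv _ from w_inv).1
    have hmxr : s_115a4fr.mxcsr &&& 8064 = 8064 := (show X86.User.abiInv _ from w_inv).2
    have hsser := Vorbis.sseOK_of_abiInv w_inv
    have c_rax2 := hpost
    have c_rsp2 := w_rsp
    u_walk hcode [hμ.vendor] until [Vorbis.L.start_decoder.cut4] span [Vorbis.L.textLo, Vorbis.L.textHi] side (v_side)
    have hcar := carry2 (pc' := Vorbis.L.start_decoder.cut4) (s := s_115a54) hloop (by rw [hF]; exact hlt) hsame1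
      (by rw [w_mem]; exact w_same) hws1 hws2 (by rw [w_mem]; exact hbits) w_rip
      (by rw [hsteady]; exact w_rsp) w_eq (by v_inv)
    refine ReachVia.done (Or.inr ⟨A, hcar.loop.frame, hcar.loop.hand, Or.inl ⟨?_, failed_of_loop hcar.loop⟩⟩)
    rw [w_rax]
    rfl

/-- **0x115a66 (cut242) … 0x115a81 (cut243)**, lines 4048–4049: the checked store of `r->begin`, `get_bits(f, 24)`. -/
theorem stage2 (Lay : Layout) (hLay : Lay.hi = 0x1000000) (μ : Microarch) (hμ : UserX.MicroOK μ) (u₀ : State)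
    (hcode : HasCodeNat Lay u₀ Vorbis.L.start_decoder.entry Vorbis.Code.code_start_decoder.nat Vorbis.L.start_decoder.size)
    (h_get_bits : ∀ (others : List Obj) (frames : List (Nat × FrameLayout)) (Blk : Block → Prop) (len : Nat), Calls Lay μ Vorbis.WayInv (Vorbis.conv u₀) Vorbis.L.get_bits.entry (Vorbis.Spec.get_bits.spec others frames Blk len))
    (h_store4 : Asan.SmallCheck Lay μ Vorbis.WayInv (Vorbis.CodeOK u₀) [.rax, .rcx, .rdx] 4 Vorbis.L.__asan_store4_noabort.entry)
    (g : Ghost) (i : Nat) (A6 A6c : Arena) (A : Arena × List Obj) (v : State)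
    (hst : Stage u₀ g Vorbis.L.start_decoder.cut242 i A6 A6c A v)
    (hty : v.mem.u16 (g.f + 324 + 2 * i) ≤ 2) (hrax : (v.reg .rax).toNat < 2 ^ 24) :
    ReachVia Lay μ WayInv v (fun w => Stage u₀ g Vorbis.L.start_decoder.cut243 i A6 A6c A w ∧
      w.mem.u16 (g.f + 324 + 2 * i) ≤ 2 ∧ w.mem.u32 (resAt g w.mem i) < 2 ^ 24 ∧ (w.reg .rax).toNat < 2 ^ 24) := by
  have hloop := hst.loop
  have hfr := hloop.frame
  have he := hfr.entry
  v_entry he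
  simp only [depth] at he_room he_stack
  simp only [UInt64.reduceOfNat, Nat.reduceAdd] at he_stack
  have hgb := h_get_bits A.2 g.frames' (g.Blk A) g.len
  have hlt := hst.lt
  -- where things are
  have hC := hloop.res.R2.1.mono hloop.res.ext6c
  obtain ⟨g1, g2, g3, g4, g5, g6, g7, g8, g9, g10, g11, g12, g13, g14⟩ := geo hfr hloop.hand hloop.mid.env.ok hloop.mid.arena hC
  simp only [voff] at g10 g11 g12 g13 g14
  obtain ⟨hLf, hLc⟩ := lives hloop
  have hR1 := hloop.res.R1
  have hRA : g.RA = (g.e.reg .rsp).toNat := rfl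
  have hR : g.R = (g.e.reg .rsp).toNat - 1480 := rfl
  have hsteady := rsp_steady g (by omega)
  have hshadow := hfr.shadow
  have hresAt : resAt g v.mem i = stb_vorbis.residue_config v.mem g.f + 32 * i := rfl
  have w_rbx := hst.rbx
  rw [hresAt] at w_rbx
  generalize hF : g.f = F at *
  generalize hc : stb_vorbis.residue_config v.mem F = c at *
  generalize hn : (stb_vorbis.residue_count v.mem F).toNat = n at *
  rw [hRA] at g1 g3 g4 g7
  have hi64 : i < 64 := by omega
  have w_rip := hfr.rip
  have w_rsp : v.reg .rsp = g.e.reg .rsp - 1480 := by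
    rw [hfr.rsp]
    exact hsteady
  have w_rbp := hst.rbp
  have w_r14 := hst.r14
  rw [hF] at w_rbp
  have c_rsp := w_rsp
  have c_rbp := w_rbp
  have c_r14 := w_r14
  have c_rbx := w_rbx
  have w_eq : Mem.EqOn Vorbis.L.textLo Vorbis.L.textHi u₀.mem v.mem := hfr.code
  have hdf : v.flags .df = false := (show abiInv _ from hfr.inv).1
  have hmx : v.mxcsr &&& 0x1F80 = 0x1F80 := (show abiInv _ from hfr.inv).2
  have hsse := Vorbis.sseOK_of_abiInv hfr.inv
  clear g8 g13
  have hFt : 0x119d40 ≤ F := (hLf.where_ hshadow hfr.offText (by decide)).1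
  have hct : 0x119d40 ≤ c := (hLc.where_ hshadow hfr.offText (by omega)).1
  obtain ⟨z, hz⟩ : ∃ z, v.reg .rax = z := ⟨_, rfl⟩
  have c_rax := hz
  rw [hz] at hrax
  have eB0 : (addr (c + 32 * i)).toNat = c + 32 * i := toNat_addr _ (by omega)
  u_walk hcode [hμ.vendor] until [Vorbis.L.start_decoder.cut243] span [Vorbis.L.textLo, Vorbis.L.textHi] side (v_side)
  case check_115a6c =>
    have hun : ShadowUntouched v.mem s_115a6c.mem := by v_untouched
    exact hLc.accSmall hshadow hun _ 4 (by decide) (by rw [eB0]; omega) (by rw [eB0]; omega)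
  case call_inv => v_inv
  case pre_115a7c =>
    have hun : ShadowUntouched v.mem s_115a7c.mem := by v_untouched
    have eF : (addr F).toNat = F := toNat_addr F (by omega)
    have hsame1 : Mem.SameExcept [⟨(g.e.reg .rsp).toNat - 1488, (g.e.reg .rsp).toNat - 1480⟩,
        ⟨c + 32 * i, c + 32 * i + 4⟩] v.mem s_115a7c.mem := by
      rw [w_mem]
      u_same
    have hws1 : ∀ w, w ∈ [(⟨(g.e.reg .rsp).toNat - 1488, (g.e.reg .rsp).toNat - 1480⟩ : Span),
        ⟨c + 32 * i, c + 32 * i + 4⟩] → SpanOwn g (resAt g v.mem i) i w := by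
      intro w hw
      simp only [List.mem_cons, List.mem_nil_iff, or_false] at hw
      unfold SpanOwn
      rw [hRA, hR, hF, hresAt]
      rcases hw with rfl | rfl <;> simp only [] <;> omega
    have hb := bitsOwn hloop (by rw [hF]; exact hlt) hsame1 hws1
    refine getBitsPre hloop ?_ hun ?_ hb ?_
    · rw [w_rsp, hR]
      u_omega
    · rw [w_rdi, hF]
      exact eF
    · rw [bitsArg_def, w_rsi]
      decide
  case cont =>
    -- 0x115a81 = cut243: `get_bits(f, 24)` returned
    simp only [X86.User.Spec.footprint, vspec, w_rsp_115a7c, w_rdi_115a7c] at w_same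
    have eF : (addr F).toNat = F := toNat_addr F (by omega)
    have eSP : (g.e.reg .rsp - 1488).toNat = (g.e.reg .rsp).toNat - 1488 := by u_omega
    rw [eF, eSP] at w_same
    have hsame1 : Mem.SameExcept [⟨(g.e.reg .rsp).toNat - 1488, (g.e.reg .rsp).toNat - 1480⟩,
        ⟨c + 32 * i, c + 32 * i + 4⟩] v.mem s_115a7c.mem := by
      rw [w_mem_115a7c]
      u_same
    have hws1 : ∀ w, w ∈ [(⟨(g.e.reg .rsp).toNat - 1488, (g.e.reg .rsp).toNat - 1480⟩ : Span),
        ⟨c + 32 * i, c + 32 * i + 4⟩] → SpanOwn g (resAt g v.mem i) i w := by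
      intro w hw
      simp only [List.mem_cons, List.mem_nil_iff, or_false] at hw
      unfold SpanOwn
      rw [hRA, hR, hF, hresAt]
      rcases hw with rfl | rfl <;> simp only [] <;> omega
    have hws2 := getBits_spans g (g.e.reg .rsp).toNat F hRA hR hF g3
    have hpost : GetBitsSpecPost (g.Blk A) g.len (s_115a7c.reg .rdi).toNat (bitsArg s_115a7c) s_115a7c s_115a7cr := w_post
    have hbits : Bits (g.Blk A) g.len s_115a7cr.mem g.f := by
      have := hpost.bits.bits
      rw [w_rdi_115a7c, eF, ← hF] at this
      exact this
    have hcar := carry2 (pc' := Vorbis.L.start_decoder.cut243) hloop (by rw [hF]; exact hlt) hsame1 w_same hws1 hws2 hbits w_rip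
      (by rw [hsteady]; exact w_rsp) (Vorbis.conv_code_eqOn w_code) w_inv
    have eR : resAt g s_115a7cr.mem i = c + 32 * i := by
      unfold resAt stb_vorbis.residue_config_at
      rw [hcar.config, hF, hc]
      rfl
    have hkF := keepRange hloop hsame1 w_same hws2 (F + 324 + 2 * i) (F + 326 + 2 * i)
      (by rw [hF]; exact Or.inl ⟨by omega, by omega⟩)
      (by
        intro w hw
        simp only [List.mem_cons, List.mem_nil_iff, or_false] at hw
        rcases hw with rfl | rfl <;> simp only [] <;> omega)
    refine ReachVia.done ⟨⟨hcar.loop, ?rbp, ?r14, ?lt, ?rbx⟩, ?ty, ?beg, ?rax⟩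
    case rbp =>
      rw [w_kept .rbp rfl]
      exact hst.rbp
    case r14 =>
      rw [w_kept .r14 rfl]
      exact hst.r14
    case lt =>
      rw [hcar.count]
      exact hst.lt
    case rbx =>
      rw [w_kept .rbx rfl, eR]
      exact c_rbx
    case rax =>
      have hr := hpost.bits.result.2
      have e24 : bitsArg s_115a7c = 24 := by
        rw [bitsArg_def, w_rsi_115a7c]
        decide
      rw [e24] at hr
      exact hr (by decide)
    case ty =>
      rw [hkF.u16 _ (Nat.le_refl _) (by omega) (by omega)]
      exact hty
    case beg =>
      have hk := keepCallee hloop w_same hws2 (c + 32 * i) (c + 32 * i + 4) (by rw [hF, hc, hn]; exact Or.inr ⟨by omega, by omega⟩)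
      rw [eR, hk.u32 _ (Nat.le_refl _) (by omega) (by omega), w_mem_115a7c]
      rw [Mem.u32_writeLE _ _ _ _ _ (by u_omega) (by omega) (by clear g7 g12; u_omega), Mem.u32_writeLE_same, toNat_part32]
      omega

/-- **0x115a81 (cut243) … 0x115abd (cut245) ∨ the epilogue**, lines 4049–4051: the checked store of `r->end`, the checked load of
`r->begin`, the test `end < begin` (`error` → 0x113b22), `get_bits(f, 24)`. -/
theorem stage3 (Lay : Layout) (hLay : Lay.hi = 0x1000000) (μ : Microarch) (hμ : UserX.MicroOK μ) (u₀ : State)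
    (hcode : HasCodeNat Lay u₀ Vorbis.L.start_decoder.entry Vorbis.Code.code_start_decoder.nat Vorbis.L.start_decoder.size)
    (h_get_bits : ∀ (others : List Obj) (frames : List (Nat × FrameLayout)) (Blk : Block → Prop) (len : Nat), Calls Lay μ Vorbis.WayInv (Vorbis.conv u₀) Vorbis.L.get_bits.entry (Vorbis.Spec.get_bits.spec others frames Blk len))
    (h_error : ∀ (others : List Obj) (frames : List (Nat × FrameLayout)), Calls Lay μ Vorbis.WayInv (Vorbis.conv u₀) Vorbis.L.error.entry (Vorbis.Spec.error.spec others frames))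
    (h_store4 : Asan.SmallCheck Lay μ Vorbis.WayInv (Vorbis.CodeOK u₀) [.rax, .rcx, .rdx] 4 Vorbis.L.__asan_store4_noabort.entry)
    (h_load4 : Asan.SmallCheck Lay μ Vorbis.WayInv (Vorbis.CodeOK u₀) [.rax, .rcx, .rdx] 4 Vorbis.L.__asan_load4_noabort.entry)
    (g : Ghost) (i : Nat) (A6 A6c : Arena) (A : Arena × List Obj) (v : State)
    (hst : Stage u₀ g Vorbis.L.start_decoder.cut243 i A6 A6c A v)
    (hty : v.mem.u16 (g.f + 324 + 2 * i) ≤ 2) (hbeg : v.mem.u32 (resAt g v.mem i) < 2 ^ 24) (hrax : (v.reg .rax).toNat < 2 ^ 24) :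
    ReachVia Lay μ WayInv v (fun w => (Stage u₀ g Vorbis.L.start_decoder.cut245 i A6 A6c A w ∧
      w.mem.u16 (g.f + 324 + 2 * i) ≤ 2 ∧
      (w.mem.u32 (resAt g w.mem i) ≤ w.mem.u32 (resAt g w.mem i + 4) ∧ w.mem.u32 (resAt g w.mem i + 4) < 2 ^ 24) ∧
      (w.reg .rax).toNat < 2 ^ 24) ∨ AtERR u₀ g w) := by
  have hloop := hst.loop
  have hfr := hloop.frame
  have he := hfr.entry
  v_entry he
  simp only [depth] at he_room he_stack
  simp only [UInt64.reduceOfNat, Nat.reduceAdd] at he_stack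
  have hgb := h_get_bits A.2 g.frames' (g.Blk A) g.len
  have herr := h_error A.2 g.frames'
  have hlt := hst.lt
  -- where things are
  have hC := hloop.res.R2.1.mono hloop.res.ext6c
  obtain ⟨g1, g2, g3, g4, g5, g6, g7, g8, g9, g10, g11, g12, g13, g14⟩ := geo hfr hloop.hand hloop.mid.env.ok hloop.mid.arena hC
  simp only [voff] at g10 g11 g12 g13 g14
  obtain ⟨hLf, hLc⟩ := lives hloop
  have hR1 := hloop.res.R1
  have hRA : g.RA = (g.e.reg .rsp).toNat := rfl
  have hR : g.R = (g.e.reg .rsp).toNat - 1480 := rfl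
  have hsteady := rsp_steady g (by omega)
  have hshadow := hfr.shadow
  have hresAt : resAt g v.mem i = stb_vorbis.residue_config v.mem g.f + 32 * i := rfl
  have w_rbx := hst.rbx
  rw [hresAt] at w_rbx
  generalize hF : g.f = F at *
  generalize hc : stb_vorbis.residue_config v.mem F = c at *
  generalize hn : (stb_vorbis.residue_count v.mem F).toNat = n at *
  rw [hRA] at g1 g3 g4 g7
  have hi64 : i < 64 := by omega
  have w_rip := hfr.rip
  have w_rsp : v.reg .rsp = g.e.reg .rsp - 1480 := by
    rw [hfr.rsp]
    exact hsteady
  have w_rbp := hst.rbp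
  have w_r14 := hst.r14
  rw [hF] at w_rbp
  have c_rsp := w_rsp
  have c_rbp := w_rbp
  have c_r14 := w_r14
  have c_rbx := w_rbx
  have w_eq : Mem.EqOn Vorbis.L.textLo Vorbis.L.textHi u₀.mem v.mem := hfr.code
  have hdf : v.flags .df = false := (show abiInv _ from hfr.inv).1
  have hmx : v.mxcsr &&& 0x1F80 = 0x1F80 := (show abiInv _ from hfr.inv).2
  have hsse := Vorbis.sseOK_of_abiInv hfr.inv
  clear g8 g13
  have hFt : 0x119d40 ≤ F := (hLf.where_ hshadow hfr.offText (by decide)).1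
  have hct : 0x119d40 ≤ c := (hLc.where_ hshadow hfr.offText (by omega)).1
  obtain ⟨z, hz⟩ : ∃ z, v.reg .rax = z := ⟨_, rfl⟩
  have c_rax := hz
  rw [hz] at hrax
  rw [hresAt] at hbeg
  have eB0 : (addr (c + 32 * i)).toNat = c + 32 * i := toNat_addr _ (by omega)
  have eB4 : (addr (c + 32 * i) + 4).toNat = c + 32 * i + 4 := toNat_addr_add _ 4 4 rfl (by omega)
  have eA4 := eq_addr _ _ eB4
  obtain ⟨b, hb⟩ : ∃ b, v.mem.u32 (c + 32 * i) = b := ⟨_, rfl⟩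
  have rb : v.mem.readLE (addr (c + 32 * i)) 4 = b := hb
  u_walk hcode [hμ.vendor] until [Vorbis.L.start_decoder.cut245, Vorbis.L.start_decoder.cut244] span [Vorbis.L.textLo, Vorbis.L.textHi] side (v_side)
  case check_115a88 =>
    have hun : ShadowUntouched v.mem s_115a88.mem := by v_untouched
    exact hLc.accSmall hshadow hun _ 4 (by decide) (by rw [eB4]; omega) (by rw [eB4]; omega)
  case check_115a94 =>
    have hun : ShadowUntouched v.mem s_115a94.mem := by v_untouched
    exact hLc.accSmall hshadow hun _ 4 (by decide) (by rw [eB0]; omega) (by rw [eB0]; omega)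
  case call_inv => v_inv
  case pre_115ab8 =>
    have hun : ShadowUntouched v.mem s_115ab8.mem := by v_untouched
    have eF : (addr F).toNat = F := toNat_addr F (by omega)
    rw [eA4] at w_mem
    have hsame1 : Mem.SameExcept [⟨(g.e.reg .rsp).toNat - 1488, (g.e.reg .rsp).toNat - 1480⟩,
        ⟨c + 32 * i + 4, c + 32 * i + 8⟩] v.mem s_115ab8.mem := by
      rw [w_mem]
      u_same
    have hws1 : ∀ w, w ∈ [(⟨(g.e.reg .rsp).toNat - 1488, (g.e.reg .rsp).toNat - 1480⟩ : Span),
        ⟨c + 32 * i + 4, c + 32 * i + 8⟩] → SpanOwn g (resAt g v.mem i) i w := by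
      intro w hw
      simp only [List.mem_cons, List.mem_nil_iff, or_false] at hw
      unfold SpanOwn
      rw [hRA, hR, hF, hresAt]
      rcases hw with rfl | rfl <;> simp only [] <;> omega
    have hb := bitsOwn hloop (by rw [hF]; exact hlt) hsame1 hws1
    refine getBitsPre hloop ?_ hun ?_ hb ?_
    · rw [w_rsp, hR]
      u_omega
    · rw [w_rdi, hF]
      exact eF
    · rw [bitsArg_def, w_rsi]
      decide
  case call_inv => v_inv
  case pre_115aa6 =>
    have hun : ShadowUntouched v.mem s_115aa6.mem := by v_untouched
    have eF : (addr F).toNat = F := toNat_addr F (by omega)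
    refine errorPre hloop ?_ hun ?_
    · rw [w_rsp, hR]
      u_omega
    · rw [w_rdi, hF]
      exact eF
  · -- 0x115abd = cut245: `get_bits(f, 24)` returned
    simp only [X86.User.Spec.footprint, vspec, w_rsp_115ab8, w_rdi_115ab8] at w_same
    have eF : (addr F).toNat = F := toNat_addr F (by omega)
    have eSP : (g.e.reg .rsp - 1488).toNat = (g.e.reg .rsp).toNat - 1488 := by u_omega
    rw [eF, eSP] at w_same
    rw [eA4] at w_mem_115ab8
    have hsame1 : Mem.SameExcept [⟨(g.e.reg .rsp).toNat - 1488, (g.e.reg .rsp).toNat - 1480⟩,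
        ⟨c + 32 * i + 4, c + 32 * i + 8⟩] v.mem s_115ab8.mem := by
      rw [w_mem_115ab8]
      u_same
    have hws1 : ∀ w, w ∈ [(⟨(g.e.reg .rsp).toNat - 1488, (g.e.reg .rsp).toNat - 1480⟩ : Span),
        ⟨c + 32 * i + 4, c + 32 * i + 8⟩] → SpanOwn g (resAt g v.mem i) i w := by
      intro w hw
      simp only [List.mem_cons, List.mem_nil_iff, or_false] at hw
      unfold SpanOwn
      rw [hRA, hR, hF, hresAt]
      rcases hw with rfl | rfl <;> simp only [] <;> omega
    have hws2 := getBits_spans g (g.e.reg .rsp).toNat F hRA hR hF g3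
    have hpost : GetBitsSpecPost (g.Blk A) g.len (s_115ab8.reg .rdi).toNat (bitsArg s_115ab8) s_115ab8 s_115ab8r := w_post
    have hbits : Bits (g.Blk A) g.len s_115ab8r.mem g.f := by
      have := hpost.bits.bits
      rw [w_rdi_115ab8, eF, ← hF] at this
      exact this
    have hcar := carry2 (pc' := Vorbis.L.start_decoder.cut245) hloop (by rw [hF]; exact hlt) hsame1 w_same hws1 hws2 hbits w_rip
      (by rw [hsteady]; exact w_rsp) (Vorbis.conv_code_eqOn w_code) w_inv
    have eR : resAt g s_115ab8r.mem i = c + 32 * i := by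
      unfold resAt stb_vorbis.residue_config_at
      rw [hcar.config, hF, hc]
      rfl
    have hkF := keepRange hloop hsame1 w_same hws2 (F + 324 + 2 * i) (F + 326 + 2 * i)
      (by rw [hF]; exact Or.inl ⟨by omega, by omega⟩)
      (by
        intro w hw
        simp only [List.mem_cons, List.mem_nil_iff, or_false] at hw
        rcases hw with rfl | rfl <;> simp only [] <;> omega)
    have hkR := keepRange hloop hsame1 w_same hws2 (c + 32 * i) (c + 32 * i + 4)
      (by rw [hF, hc, hn]; exact Or.inr ⟨by omega, by omega⟩)
      (by
        intro w hw
        simp only [List.mem_cons, List.mem_nil_iff, or_false] at hw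
        rcases hw with rfl | rfl <;> simp only [] <;> omega)
    have hkN := keepCallee hloop w_same hws2 (c + 32 * i + 4) (c + 32 * i + 8)
      (by rw [hF, hc, hn]; exact Or.inr ⟨by omega, by omega⟩)
    have hrax' : (s_115ab8r.reg .rax).toNat < 2 ^ 24 := by
      have hr := hpost.bits.result.2
      have en : bitsArg s_115ab8 = 24 := by
        rw [bitsArg_def, w_rsi_115ab8]
        decide
      rw [en] at hr
      exact hr (by decide)
    have hstage : Stage u₀ g Vorbis.L.start_decoder.cut245 i A6 A6c A s_115ab8r := by
      refine ⟨hcar.loop, ?rbp, ?r14, ?lt, ?rbx⟩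
      case rbp =>
        rw [w_kept .rbp rfl]
        exact hst.rbp
      case r14 =>
        rw [w_kept .r14 rfl]
        exact hst.r14
      case lt =>
        rw [hcar.count]
        exact hst.lt
      case rbx =>
        rw [w_kept .rbx rfl, eR]
        exact c_rbx
    have hty' : s_115ab8r.mem.u16 (F + 324 + 2 * i) ≤ 2 := by
      rw [hkF.u16 _ (Nat.le_refl _) (by omega) (by omega)]
      exact hty
    refine ReachVia.done (Or.inl ⟨hstage, hty', ⟨?le, ?lt24⟩, hrax'⟩)
    case le =>
      rw [eR, hkR.u32 _ (Nat.le_refl _) (by omega) (by omega), hkN.u32 _ (Nat.le_refl _) (by omega) (by omega), hb, w_mem_115ab8]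
      rw [Mem.u32_writeLE _ _ _ _ _ (by u_omega) (by omega) (by clear g7 g12; u_omega)]
      rw [Mem.u32_writeLE_same, toNat_part32]
      rw [toNat_part32] at hbr_115a9c
      omega
    case lt24 =>
      rw [eR, hkN.u32 _ (Nat.le_refl _) (by omega) (by omega), w_mem_115ab8]
      rw [Mem.u32_writeLE _ _ _ _ _ (by u_omega) (by omega) (by clear g7 g12; u_omega)]
      rw [Mem.u32_writeLE_same, toNat_part32]
      omega
  · -- 0x115aab = cut244: `error(f, VORBIS_invalid_setup)` returned; `jmp 113b22`
    simp only [X86.User.Spec.footprint, vspec, w_rsp_115aa6, w_rdi_115aa6] at w_same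
    have eF : (addr F).toNat = F := toNat_addr F (by omega)
    have eSP : (g.e.reg .rsp - 1488).toNat = (g.e.reg .rsp).toNat - 1488 := by u_omega
    rw [eF, eSP] at w_same
    rw [eA4] at w_mem_115aa6
    have hsame1 : Mem.SameExcept [⟨(g.e.reg .rsp).toNat - 1488, (g.e.reg .rsp).toNat - 1480⟩,
        ⟨c + 32 * i + 4, c + 32 * i + 8⟩] v.mem s_115aa6.mem := by
      rw [w_mem_115aa6]
      u_same
    have hws1 : ∀ w, w ∈ [(⟨(g.e.reg .rsp).toNat - 1488, (g.e.reg .rsp).toNat - 1480⟩ : Span),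
        ⟨c + 32 * i + 4, c + 32 * i + 8⟩] → SpanOwn g (resAt g v.mem i) i w := by
      intro w hw
      simp only [List.mem_cons, List.mem_nil_iff, or_false] at hw
      unfold SpanOwn
      rw [hRA, hR, hF, hresAt]
      rcases hw with rfl | rfl <;> simp only [] <;> omega
    have hws2 := error_spans g (g.e.reg .rsp).toNat F hRA hR hF g3
    have hb1 := bitsOwn hloop (by rw [hF]; exact hlt) hsame1 hws1
    have hbits : Bits (g.Blk A) g.len s_115aa6r.mem g.f := by
      apply bitsError hfr hloop.hand hloop.mid.env.ok hloop.mid.arena hC hb1 w_same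
      intro w hw
      have := hws2 w hw
      unfold SpanCallee at this
      simp only [List.mem_cons, List.mem_nil_iff, or_false] at hw
      rw [hRA, hR, hF]
      rcases hw with rfl | rfl <;> simp only [] <;> omega
    have hpost : s_115aa6r.reg .rax = 0 := w_post.1
    have w_eq := Vorbis.conv_code_eqOn w_code
    have hdfr : s_115aa6r.flags .df = false := (show X86.User.abiInv _ from w_inv).1
    have hmxr : s_115aa6r.mxcsr &&& 8064 = 8064 := (show X86.User.abiInv _ from w_inv).2
    have hsser := Vorbis.sseOK_of_abiInv w_inv
    have c_rax2 := hpost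
    have c_rsp2 := w_rsp
    u_walk hcode [hμ.vendor] until [Vorbis.L.start_decoder.cut4] span [Vorbis.L.textLo, Vorbis.L.textHi] side (v_side)
    have hcar := carry2 (pc' := Vorbis.L.start_decoder.cut4) (s := s_115aab) hloop (by rw [hF]; exact hlt) hsame1
      (by rw [w_mem]; exact w_same) hws1 hws2 (by rw [w_mem]; exact hbits) w_rip
      (by rw [hsteady]; exact w_rsp) w_eq (by v_inv)
    refine ReachVia.done (Or.inr ⟨A, hcar.loop.frame, hcar.loop.hand, Or.inl ⟨?_, failed_of_loop hcar.loop⟩⟩)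
    rw [w_rax]
    rfl

/-- **0x115abd (cut245) … 0x115adb (cut246)**, lines 4051–4052: the checked store of `r->part_size`, `get_bits(f, 6)`. -/
theorem stage4 (Lay : Layout) (hLay : Lay.hi = 0x1000000) (μ : Microarch) (hμ : UserX.MicroOK μ) (u₀ : State)
    (hcode : HasCodeNat Lay u₀ Vorbis.L.start_decoder.entry Vorbis.Code.code_start_decoder.nat Vorbis.L.start_decoder.size)
    (h_get_bits : ∀ (others : List Obj) (frames : List (Nat × FrameLayout)) (Blk : Block → Prop) (len : Nat), Calls Lay μ Vorbis.WayInv (Vorbis.conv u₀) Vorbis.L.get_bits.entry (Vorbis.Spec.get_bits.spec others frames Blk len))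
    (h_error : ∀ (others : List Obj) (frames : List (Nat × FrameLayout)), Calls Lay μ Vorbis.WayInv (Vorbis.conv u₀) Vorbis.L.error.entry (Vorbis.Spec.error.spec others frames))
    (h_store4 : Asan.SmallCheck Lay μ Vorbis.WayInv (Vorbis.CodeOK u₀) [.rax, .rcx, .rdx] 4 Vorbis.L.__asan_store4_noabort.entry)
    (_h_load4 : Asan.SmallCheck Lay μ Vorbis.WayInv (Vorbis.CodeOK u₀) [.rax, .rcx, .rdx] 4 Vorbis.L.__asan_load4_noabort.entry)
    (_h_store1 : Asan.SmallCheck Lay μ Vorbis.WayInv (Vorbis.CodeOK u₀) [.rax, .rdx] 1 Vorbis.L.__asan_store1_noabort.entry)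
    (g : Ghost) (i : Nat) (A6 A6c : Arena) (A : Arena × List Obj) (v : State)
    (hst : Stage u₀ g Vorbis.L.start_decoder.cut245 i A6 A6c A v)
    (hty : v.mem.u16 (g.f + 324 + 2 * i) ≤ 2)
    (hr4 : v.mem.u32 (resAt g v.mem i) ≤ v.mem.u32 (resAt g v.mem i + 4) ∧ v.mem.u32 (resAt g v.mem i + 4) < 2 ^ 24)
    (hrax : (v.reg .rax).toNat < 2 ^ 24) :
    ReachVia Lay μ WayInv v (fun w => Stage u₀ g Vorbis.L.start_decoder.cut246 i A6 A6c A w ∧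
      w.mem.u16 (g.f + 324 + 2 * i) ≤ 2 ∧
      (w.mem.u32 (resAt g w.mem i) ≤ w.mem.u32 (resAt g w.mem i + 4) ∧ w.mem.u32 (resAt g w.mem i + 4) < 2 ^ 24) ∧
      (1 ≤ w.mem.u32 (resAt g w.mem i + 8) ∧ w.mem.u32 (resAt g w.mem i + 8) ≤ 2 ^ 24) ∧
      (w.reg .rax).toNat < 2 ^ 6) := by
  have hloop := hst.loop
  have hfr := hloop.frame
  have he := hfr.entry
  v_entry he
  simp only [depth] at he_room he_stack
  simp only [UInt64.reduceOfNat, Nat.reduceAdd] at he_stack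
  have hgb := h_get_bits A.2 g.frames' (g.Blk A) g.len
  have herr := h_error A.2 g.frames'
  have hlt := hst.lt
  -- where things are
  have hC := hloop.res.R2.1.mono hloop.res.ext6c
  obtain ⟨g1, g2, g3, g4, g5, g6, g7, g8, g9, g10, g11, g12, g13, g14⟩ := geo hfr hloop.hand hloop.mid.env.ok hloop.mid.arena hC
  simp only [voff] at g10 g11 g12 g13 g14
  obtain ⟨hLf, hLc⟩ := lives hloop
  have hR1 := hloop.res.R1
  have hRA : g.RA = (g.e.reg .rsp).toNat := rfl
  have hR : g.R = (g.e.reg .rsp).toNat - 1480 := rfl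
  have hsteady := rsp_steady g (by omega)
  have hshadow := hfr.shadow
  have hresAt : resAt g v.mem i = stb_vorbis.residue_config v.mem g.f + 32 * i := rfl
  have w_rbx := hst.rbx
  rw [hresAt] at w_rbx
  generalize hF : g.f = F at *
  generalize hc : stb_vorbis.residue_config v.mem F = c at *
  generalize hn : (stb_vorbis.residue_count v.mem F).toNat = n at *
  rw [hRA] at g1 g3 g4 g7
  have hi64 : i < 64 := by omega
  have w_rip := hfr.rip
  have w_rsp : v.reg .rsp = g.e.reg .rsp - 1480 := by
    rw [hfr.rsp]
    exact hsteady
  have w_rbp := hst.rbp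
  have w_r14 := hst.r14
  rw [hF] at w_rbp
  have c_rsp := w_rsp
  have c_rbp := w_rbp
  have c_r14 := w_r14
  have c_rbx := w_rbx
  have w_eq : Mem.EqOn Vorbis.L.textLo Vorbis.L.textHi u₀.mem v.mem := hfr.code
  have hdf : v.flags .df = false := (show abiInv _ from hfr.inv).1
  have hmx : v.mxcsr &&& 0x1F80 = 0x1F80 := (show abiInv _ from hfr.inv).2
  have hsse := Vorbis.sseOK_of_abiInv hfr.inv
  clear g8 g13
  have hFt : 0x119d40 ≤ F := (hLf.where_ hshadow hfr.offText (by decide)).1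
  have hct : 0x119d40 ≤ c := (hLc.where_ hshadow hfr.offText (by omega)).1
  obtain ⟨z, hz⟩ : ∃ z, v.reg .rax = z := ⟨_, rfl⟩
  have c_rax := hz
  rw [hz] at hrax
  rw [hresAt] at hr4
  have eB8 : (addr (c + 32 * i) + 8).toNat = c + 32 * i + 8 := toNat_addr_add _ 8 8 rfl (by omega)
  have eA8 := eq_addr _ _ eB8
  u_walk hcode [hμ.vendor] until [Vorbis.L.start_decoder.cut246] span [Vorbis.L.textLo, Vorbis.L.textHi] side (v_side)
  case check_115ac5 =>
    have hun : ShadowUntouched v.mem s_115ac5.mem := by v_untouched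
    exact hLc.accSmall hshadow hun _ 4 (by decide) (by rw [eB8]; omega) (by rw [eB8]; omega)
  case call_inv => v_inv
  case pre_115ad6 =>
    have hun : ShadowUntouched v.mem s_115ad6.mem := by v_untouched
    have eF : (addr F).toNat = F := toNat_addr F (by omega)
    rw [eA8] at w_mem
    have hsame1 : Mem.SameExcept [⟨(g.e.reg .rsp).toNat - 1488, (g.e.reg .rsp).toNat - 1480⟩,
        ⟨c + 32 * i + 8, c + 32 * i + 12⟩] v.mem s_115ad6.mem := by
      rw [w_mem]
      u_same
    have hws1 : ∀ w, w ∈ [(⟨(g.e.reg .rsp).toNat - 1488, (g.e.reg .rsp).toNat - 1480⟩ : Span),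
        ⟨c + 32 * i + 8, c + 32 * i + 12⟩] → SpanOwn g (resAt g v.mem i) i w := by
      intro w hw
      simp only [List.mem_cons, List.mem_nil_iff, or_false] at hw
      unfold SpanOwn
      rw [hRA, hR, hF, hresAt]
      rcases hw with rfl | rfl <;> simp only [] <;> omega
    have hb := bitsOwn hloop (by rw [hF]; exact hlt) hsame1 hws1
    refine getBitsPre hloop ?_ hun ?_ hb ?_
    · rw [w_rsp, hR]
      u_omega
    · rw [w_rdi, hF]
      exact eF
    · rw [bitsArg_def, w_rsi]
      decide
  case cont =>
    -- 0x115adb = cut246: `get_bits(f, 6)` returned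
    simp only [X86.User.Spec.footprint, vspec, w_rsp_115ad6, w_rdi_115ad6] at w_same
    have eF : (addr F).toNat = F := toNat_addr F (by omega)
    have eSP : (g.e.reg .rsp - 1488).toNat = (g.e.reg .rsp).toNat - 1488 := by u_omega
    rw [eF, eSP] at w_same
    rw [eA8] at w_mem_115ad6
    have hsame1 : Mem.SameExcept [⟨(g.e.reg .rsp).toNat - 1488, (g.e.reg .rsp).toNat - 1480⟩,
        ⟨c + 32 * i + 8, c + 32 * i + 12⟩] v.mem s_115ad6.mem := by
      rw [w_mem_115ad6]
      u_same
    have hws1 : ∀ w, w ∈ [(⟨(g.e.reg .rsp).toNat - 1488, (g.e.reg .rsp).toNat - 1480⟩ : Span),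
        ⟨c + 32 * i + 8, c + 32 * i + 12⟩] → SpanOwn g (resAt g v.mem i) i w := by
      intro w hw
      simp only [List.mem_cons, List.mem_nil_iff, or_false] at hw
      unfold SpanOwn
      rw [hRA, hR, hF, hresAt]
      rcases hw with rfl | rfl <;> simp only [] <;> omega
    have hws2 := getBits_spans g (g.e.reg .rsp).toNat F hRA hR hF g3
    have hpost : GetBitsSpecPost (g.Blk A) g.len (s_115ad6.reg .rdi).toNat (bitsArg s_115ad6) s_115ad6 s_115ad6r := w_post
    have hbits : Bits (g.Blk A) g.len s_115ad6r.mem g.f := by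
      have := hpost.bits.bits
      rw [w_rdi_115ad6, eF, ← hF] at this
      exact this
    have hcar := carry2 (pc' := Vorbis.L.start_decoder.cut246) hloop (by rw [hF]; exact hlt) hsame1 w_same hws1 hws2 hbits w_rip
      (by rw [hsteady]; exact w_rsp) (Vorbis.conv_code_eqOn w_code) w_inv
    have eR : resAt g s_115ad6r.mem i = c + 32 * i := by
      unfold resAt stb_vorbis.residue_config_at
      rw [hcar.config, hF, hc]
      rfl
    have hkF := keepRange hloop hsame1 w_same hws2 (F + 324 + 2 * i) (F + 326 + 2 * i)
      (by rw [hF]; exact Or.inl ⟨by omega, by omega⟩)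
      (by
        intro w hw
        simp only [List.mem_cons, List.mem_nil_iff, or_false] at hw
        rcases hw with rfl | rfl <;> simp only [] <;> omega)
    have hkR := keepRange hloop hsame1 w_same hws2 (c + 32 * i) (c + 32 * i + 8)
      (by rw [hF, hc, hn]; exact Or.inr ⟨by omega, by omega⟩)
      (by
        intro w hw
        simp only [List.mem_cons, List.mem_nil_iff, or_false] at hw
        rcases hw with rfl | rfl <;> simp only [] <;> omega)
    have hkN := keepCallee hloop w_same hws2 (c + 32 * i + 8) (c + 32 * i + 12)
      (by rw [hF, hc, hn]; exact Or.inr ⟨by omega, by omega⟩)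
    have hrax' : (s_115ad6r.reg .rax).toNat < 2 ^ 6 := by
      have hr := hpost.bits.result.2
      have en : bitsArg s_115ad6 = 6 := by
        rw [bitsArg_def, w_rsi_115ad6]
        decide
      rw [en] at hr
      exact hr (by decide)
    have hstage : Stage u₀ g Vorbis.L.start_decoder.cut246 i A6 A6c A s_115ad6r := by
      refine ⟨hcar.loop, ?rbp, ?r14, ?lt, ?rbx⟩
      case rbp =>
        rw [w_kept .rbp rfl]
        exact hst.rbp
      case r14 =>
        rw [w_kept .r14 rfl]
        exact hst.r14
      case lt =>
        rw [hcar.count]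
        exact hst.lt
      case rbx =>
        rw [w_kept .rbx rfl, eR]
        exact c_rbx
    have hty' : s_115ad6r.mem.u16 (F + 324 + 2 * i) ≤ 2 := by
      rw [hkF.u16 _ (Nat.le_refl _) (by omega) (by omega)]
      exact hty
    have hv := val32_succ z hrax
    have hnew : s_115ad6r.mem.u32 (c + 32 * i + 8) = z.toNat + 1 := by
      rw [hkN.u32 _ (Nat.le_refl _) (by omega) (by omega), w_mem_115ad6]
      rw [Mem.u32_writeLE _ _ _ _ _ (by u_omega) (by omega) (by clear g7 g12; u_omega)]
      rw [Mem.u32_writeLE_same, hv]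
      omega
    refine ReachVia.done ⟨hstage, hty', ?r4, ?r5, hrax'⟩
    case r4 =>
      rw [eR, hkR.u32 _ (Nat.le_refl _) (by omega) (by omega), hkR.u32 _ (by omega) (by omega) (by omega)]
      exact hr4
    case r5 =>
      rw [eR, hnew]
      omega

/-- **0x115adb (cut246) … 0x115af9 (cut247)**, lines 4052–4053: the checked store of `r->classifications`, `get_bits(f, 8)`. -/
theorem stage5 (Lay : Layout) (hLay : Lay.hi = 0x1000000) (μ : Microarch) (hμ : UserX.MicroOK μ) (u₀ : State)
    (hcode : HasCodeNat Lay u₀ Vorbis.L.start_decoder.entry Vorbis.Code.code_start_decoder.nat Vorbis.L.start_decoder.size)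
    (h_get_bits : ∀ (others : List Obj) (frames : List (Nat × FrameLayout)) (Blk : Block → Prop) (len : Nat), Calls Lay μ Vorbis.WayInv (Vorbis.conv u₀) Vorbis.L.get_bits.entry (Vorbis.Spec.get_bits.spec others frames Blk len))
    (h_error : ∀ (others : List Obj) (frames : List (Nat × FrameLayout)), Calls Lay μ Vorbis.WayInv (Vorbis.conv u₀) Vorbis.L.error.entry (Vorbis.Spec.error.spec others frames))
    (_h_store4 : Asan.SmallCheck Lay μ Vorbis.WayInv (Vorbis.CodeOK u₀) [.rax, .rcx, .rdx] 4 Vorbis.L.__asan_store4_noabort.entry)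
    (_h_load4 : Asan.SmallCheck Lay μ Vorbis.WayInv (Vorbis.CodeOK u₀) [.rax, .rcx, .rdx] 4 Vorbis.L.__asan_load4_noabort.entry)
    (h_store1 : Asan.SmallCheck Lay μ Vorbis.WayInv (Vorbis.CodeOK u₀) [.rax, .rdx] 1 Vorbis.L.__asan_store1_noabort.entry)
    (g : Ghost) (i : Nat) (A6 A6c : Arena) (A : Arena × List Obj) (v : State)
    (hst : Stage u₀ g Vorbis.L.start_decoder.cut246 i A6 A6c A v)
    (hty : v.mem.u16 (g.f + 324 + 2 * i) ≤ 2)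
    (hr4 : v.mem.u32 (resAt g v.mem i) ≤ v.mem.u32 (resAt g v.mem i + 4) ∧ v.mem.u32 (resAt g v.mem i + 4) < 2 ^ 24)
    (hr5 : 1 ≤ v.mem.u32 (resAt g v.mem i + 8) ∧ v.mem.u32 (resAt g v.mem i + 8) ≤ 2 ^ 24)
    (hrax : (v.reg .rax).toNat < 2 ^ 6) :
    ReachVia Lay μ WayInv v (fun w => Stage u₀ g Vorbis.L.start_decoder.cut247 i A6 A6c A w ∧
      w.mem.u16 (g.f + 324 + 2 * i) ≤ 2 ∧
      (w.mem.u32 (resAt g w.mem i) ≤ w.mem.u32 (resAt g w.mem i + 4) ∧ w.mem.u32 (resAt g w.mem i + 4) < 2 ^ 24) ∧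
      (1 ≤ w.mem.u32 (resAt g w.mem i + 8) ∧ w.mem.u32 (resAt g w.mem i + 8) ≤ 2 ^ 24) ∧
      (1 ≤ w.mem.u8 (resAt g w.mem i + 12) ∧ w.mem.u8 (resAt g w.mem i + 12) ≤ 64) ∧
      (w.reg .rax).toNat < 2 ^ 8) := by
  have hloop := hst.loop
  have hfr := hloop.frame
  have he := hfr.entry
  v_entry he
  simp only [depth] at he_room he_stack
  simp only [UInt64.reduceOfNat, Nat.reduceAdd] at he_stack
  have hgb := h_get_bits A.2 g.frames' (g.Blk A) g.len
  have herr := h_error A.2 g.frames'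
  have hlt := hst.lt
  -- where things are
  have hC := hloop.res.R2.1.mono hloop.res.ext6c
  obtain ⟨g1, g2, g3, g4, g5, g6, g7, g8, g9, g10, g11, g12, g13, g14⟩ := geo hfr hloop.hand hloop.mid.env.ok hloop.mid.arena hC
  simp only [voff] at g10 g11 g12 g13 g14
  obtain ⟨hLf, hLc⟩ := lives hloop
  have hR1 := hloop.res.R1
  have hRA : g.RA = (g.e.reg .rsp).toNat := rfl
  have hR : g.R = (g.e.reg .rsp).toNat - 1480 := rfl
  have hsteady := rsp_steady g (by omega)
  have hshadow := hfr.shadow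
  have hresAt : resAt g v.mem i = stb_vorbis.residue_config v.mem g.f + 32 * i := rfl
  have w_rbx := hst.rbx
  rw [hresAt] at w_rbx
  generalize hF : g.f = F at *
  generalize hc : stb_vorbis.residue_config v.mem F = c at *
  generalize hn : (stb_vorbis.residue_count v.mem F).toNat = n at *
  rw [hRA] at g1 g3 g4 g7
  have hi64 : i < 64 := by omega
  have w_rip := hfr.rip
  have w_rsp : v.reg .rsp = g.e.reg .rsp - 1480 := by
    rw [hfr.rsp]
    exact hsteady
  have w_rbp := hst.rbp
  have w_r14 := hst.r14
  rw [hF] at w_rbp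
  have c_rsp := w_rsp
  have c_rbp := w_rbp
  have c_r14 := w_r14
  have c_rbx := w_rbx
  have w_eq : Mem.EqOn Vorbis.L.textLo Vorbis.L.textHi u₀.mem v.mem := hfr.code
  have hdf : v.flags .df = false := (show abiInv _ from hfr.inv).1
  have hmx : v.mxcsr &&& 0x1F80 = 0x1F80 := (show abiInv _ from hfr.inv).2
  have hsse := Vorbis.sseOK_of_abiInv hfr.inv
  clear g8 g13
  have hFt : 0x119d40 ≤ F := (hLf.where_ hshadow hfr.offText (by decide)).1
  have hct : 0x119d40 ≤ c := (hLc.where_ hshadow hfr.offText (by omega)).1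
  obtain ⟨z, hz⟩ : ∃ z, v.reg .rax = z := ⟨_, rfl⟩
  have c_rax := hz
  rw [hz] at hrax
  rw [hresAt] at hr4 hr5
  have eB12 : (addr (c + 32 * i) + 12).toNat = c + 32 * i + 12 := toNat_addr_add _ 12 12 rfl (by omega)
  have eA12 := eq_addr _ _ eB12
  u_walk hcode [hμ.vendor] until [Vorbis.L.start_decoder.cut247] span [Vorbis.L.textLo, Vorbis.L.textHi] side (v_side)
  case check_115ae3 =>
    have hun : ShadowUntouched v.mem s_115ae3.mem := by v_untouched
    exact hLc.accSmall hshadow hun _ 1 (by decide) (by rw [eB12]; omega) (by rw [eB12]; omega)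
  case call_inv => v_inv
  case pre_115af4 =>
    have hun : ShadowUntouched v.mem s_115af4.mem := by v_untouched
    have eF : (addr F).toNat = F := toNat_addr F (by omega)
    rw [eA12] at w_mem
    have hsame1 : Mem.SameExcept [⟨(g.e.reg .rsp).toNat - 1488, (g.e.reg .rsp).toNat - 1480⟩,
        ⟨c + 32 * i + 12, c + 32 * i + 13⟩] v.mem s_115af4.mem := by
      rw [w_mem]
      u_same
    have hws1 : ∀ w, w ∈ [(⟨(g.e.reg .rsp).toNat - 1488, (g.e.reg .rsp).toNat - 1480⟩ : Span),
        ⟨c + 32 * i + 12, c + 32 * i + 13⟩] → SpanOwn g (resAt g v.mem i) i w := by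
      intro w hw
      simp only [List.mem_cons, List.mem_nil_iff, or_false] at hw
      unfold SpanOwn
      rw [hRA, hR, hF, hresAt]
      rcases hw with rfl | rfl <;> simp only [] <;> omega
    have hb := bitsOwn hloop (by rw [hF]; exact hlt) hsame1 hws1
    refine getBitsPre hloop ?_ hun ?_ hb ?_
    · rw [w_rsp, hR]
      u_omega
    · rw [w_rdi, hF]
      exact eF
    · rw [bitsArg_def, w_rsi]
      decide
  case cont =>
    -- 0x115af9 = cut247: `get_bits(f, 8)` returned
    simp only [X86.User.Spec.footprint, vspec, w_rsp_115af4, w_rdi_115af4] at w_same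
    have eF : (addr F).toNat = F := toNat_addr F (by omega)
    have eSP : (g.e.reg .rsp - 1488).toNat = (g.e.reg .rsp).toNat - 1488 := by u_omega
    rw [eF, eSP] at w_same
    rw [eA12] at w_mem_115af4
    have hsame1 : Mem.SameExcept [⟨(g.e.reg .rsp).toNat - 1488, (g.e.reg .rsp).toNat - 1480⟩,
        ⟨c + 32 * i + 12, c + 32 * i + 13⟩] v.mem s_115af4.mem := by
      rw [w_mem_115af4]
      u_same
    have hws1 : ∀ w, w ∈ [(⟨(g.e.reg .rsp).toNat - 1488, (g.e.reg .rsp).toNat - 1480⟩ : Span),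
        ⟨c + 32 * i + 12, c + 32 * i + 13⟩] → SpanOwn g (resAt g v.mem i) i w := by
      intro w hw
      simp only [List.mem_cons, List.mem_nil_iff, or_false] at hw
      unfold SpanOwn
      rw [hRA, hR, hF, hresAt]
      rcases hw with rfl | rfl <;> simp only [] <;> omega
    have hws2 := getBits_spans g (g.e.reg .rsp).toNat F hRA hR hF g3
    have hpost : GetBitsSpecPost (g.Blk A) g.len (s_115af4.reg .rdi).toNat (bitsArg s_115af4) s_115af4 s_115af4r := w_post
    have hbits : Bits (g.Blk A) g.len s_115af4r.mem g.f := by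
      have := hpost.bits.bits
      rw [w_rdi_115af4, eF, ← hF] at this
      exact this
    have hcar := carry2 (pc' := Vorbis.L.start_decoder.cut247) hloop (by rw [hF]; exact hlt) hsame1 w_same hws1 hws2 hbits w_rip
      (by rw [hsteady]; exact w_rsp) (Vorbis.conv_code_eqOn w_code) w_inv
    have eR : resAt g s_115af4r.mem i = c + 32 * i := by
      unfold resAt stb_vorbis.residue_config_at
      rw [hcar.config, hF, hc]
      rfl
    have hkF := keepRange hloop hsame1 w_same hws2 (F + 324 + 2 * i) (F + 326 + 2 * i)
      (by rw [hF]; exact Or.inl ⟨by omega, by omega⟩)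
      (by
        intro w hw
        simp only [List.mem_cons, List.mem_nil_iff, or_false] at hw
        rcases hw with rfl | rfl <;> simp only [] <;> omega)
    have hkR := keepRange hloop hsame1 w_same hws2 (c + 32 * i) (c + 32 * i + 12)
      (by rw [hF, hc, hn]; exact Or.inr ⟨by omega, by omega⟩)
      (by
        intro w hw
        simp only [List.mem_cons, List.mem_nil_iff, or_false] at hw
        rcases hw with rfl | rfl <;> simp only [] <;> omega)
    have hkN := keepCallee hloop w_same hws2 (c + 32 * i + 12) (c + 32 * i + 13)
      (by rw [hF, hc, hn]; exact Or.inr ⟨by omega, by omega⟩)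
    have hrax' : (s_115af4r.reg .rax).toNat < 2 ^ 8 := by
      have hr := hpost.bits.result.2
      have en : bitsArg s_115af4 = 8 := by
        rw [bitsArg_def, w_rsi_115af4]
        decide
      rw [en] at hr
      exact hr (by decide)
    have hstage : Stage u₀ g Vorbis.L.start_decoder.cut247 i A6 A6c A s_115af4r := by
      refine ⟨hcar.loop, ?rbp, ?r14, ?lt, ?rbx⟩
      case rbp =>
        rw [w_kept .rbp rfl]
        exact hst.rbp
      case r14 =>
        rw [w_kept .r14 rfl]
        exact hst.r14
      case lt =>
        rw [hcar.count]
        exact hst.lt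
      case rbx =>
        rw [w_kept .rbx rfl, eR]
        exact c_rbx
    have hty' : s_115af4r.mem.u16 (F + 324 + 2 * i) ≤ 2 := by
      rw [hkF.u16 _ (Nat.le_refl _) (by omega) (by omega)]
      exact hty
    have hv := val8_succ z hrax
    have hnew : s_115af4r.mem.u8 (c + 32 * i + 12) = z.toNat + 1 := by
      rw [hkN.u8 _ (Nat.le_refl _) (by omega) (by omega), w_mem_115af4]
      rw [Mem.u8_writeLE _ _ _ _ _ (by u_omega) (by omega) (by clear g7 g12; u_omega)]
      rw [Mem.u8_writeLE_same, hv]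
      omega
    refine ReachVia.done ⟨hstage, hty', ?r4, ?r5, ?r6, hrax'⟩
    case r4 =>
      rw [eR, hkR.u32 _ (Nat.le_refl _) (by omega) (by omega), hkR.u32 _ (by omega) (by omega) (by omega)]
      exact hr4
    case r5 =>
      rw [eR, hkR.u32 _ (by omega) (by omega) (by omega)]
      exact hr5
    case r6 =>
      rw [eR, hnew]
      omega

/-- **0x115af9 (cut247) … 0x115bdc (cut255 = R4) ∨ the epilogue**, lines 4053–4054: the checked store of `r->classbook`, the checked
load of `f->codebook_count`, the signed test (`error` → 0x113b22): the exit assertion `AtR4` is built here. -/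
theorem stage6 (Lay : Layout) (hLay : Lay.hi = 0x1000000) (μ : Microarch) (hμ : UserX.MicroOK μ) (u₀ : State)
    (hcode : HasCodeNat Lay u₀ Vorbis.L.start_decoder.entry Vorbis.Code.code_start_decoder.nat Vorbis.L.start_decoder.size)
    (h_get_bits : ∀ (others : List Obj) (frames : List (Nat × FrameLayout)) (Blk : Block → Prop) (len : Nat), Calls Lay μ Vorbis.WayInv (Vorbis.conv u₀) Vorbis.L.get_bits.entry (Vorbis.Spec.get_bits.spec others frames Blk len))
    (h_error : ∀ (others : List Obj) (frames : List (Nat × FrameLayout)), Calls Lay μ Vorbis.WayInv (Vorbis.conv u₀) Vorbis.L.error.entry (Vorbis.Spec.error.spec others frames))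
    (_h_store4 : Asan.SmallCheck Lay μ Vorbis.WayInv (Vorbis.CodeOK u₀) [.rax, .rcx, .rdx] 4 Vorbis.L.__asan_store4_noabort.entry)
    (h_load4 : Asan.SmallCheck Lay μ Vorbis.WayInv (Vorbis.CodeOK u₀) [.rax, .rcx, .rdx] 4 Vorbis.L.__asan_load4_noabort.entry)
    (h_store1 : Asan.SmallCheck Lay μ Vorbis.WayInv (Vorbis.CodeOK u₀) [.rax, .rdx] 1 Vorbis.L.__asan_store1_noabort.entry)
    (g : Ghost) (i : Nat) (A6 A6c : Arena) (A : Arena × List Obj) (v : State)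
    (hst : Stage u₀ g Vorbis.L.start_decoder.cut247 i A6 A6c A v)
    (hty : v.mem.u16 (g.f + 324 + 2 * i) ≤ 2)
    (hr4 : v.mem.u32 (resAt g v.mem i) ≤ v.mem.u32 (resAt g v.mem i + 4) ∧ v.mem.u32 (resAt g v.mem i + 4) < 2 ^ 24)
    (hr5 : 1 ≤ v.mem.u32 (resAt g v.mem i + 8) ∧ v.mem.u32 (resAt g v.mem i + 8) ≤ 2 ^ 24)
    (hr6 : 1 ≤ v.mem.u8 (resAt g v.mem i + 12) ∧ v.mem.u8 (resAt g v.mem i + 12) ≤ 64)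
    (hrax : (v.reg .rax).toNat < 2 ^ 8) :
    ReachVia Lay μ WayInv v (fun w => AtR4 u₀ g i w ∨ AtERR u₀ g w) := by
  have hloop := hst.loop
  have hfr := hloop.frame
  have he := hfr.entry
  v_entry he
  simp only [depth] at he_room he_stack
  simp only [UInt64.reduceOfNat, Nat.reduceAdd] at he_stack
  have hgb := h_get_bits A.2 g.frames' (g.Blk A) g.len
  have herr := h_error A.2 g.frames'
  have hlt := hst.lt
  -- where things are
  have hC := hloop.res.R2.1.mono hloop.res.ext6c
  obtain ⟨g1, g2, g3, g4, g5, g6, g7, g8, g9, g10, g11, g12, g13, g14⟩ := geo hfr hloop.hand hloop.mid.env.ok hloop.mid.arena hC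
  simp only [voff] at g10 g11 g12 g13 g14
  obtain ⟨hLf, hLc⟩ := lives hloop
  have hR1 := hloop.res.R1
  have hRA : g.RA = (g.e.reg .rsp).toNat := rfl
  have hR : g.R = (g.e.reg .rsp).toNat - 1480 := rfl
  have hsteady := rsp_steady g (by omega)
  have hshadow := hfr.shadow
  have hresAt : resAt g v.mem i = stb_vorbis.residue_config v.mem g.f + 32 * i := rfl
  have w_rbx := hst.rbx
  rw [hresAt] at w_rbx
  generalize hF : g.f = F at *
  generalize hc : stb_vorbis.residue_config v.mem F = c at *
  generalize hn : (stb_vorbis.residue_count v.mem F).toNat = n at *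
  rw [hRA] at g1 g3 g4 g7
  have hi64 : i < 64 := by omega
  have w_rip := hfr.rip
  have w_rsp : v.reg .rsp = g.e.reg .rsp - 1480 := by
    rw [hfr.rsp]
    exact hsteady
  have w_rbp := hst.rbp
  have w_r14 := hst.r14
  rw [hF] at w_rbp
  have c_rsp := w_rsp
  have c_rbp := w_rbp
  have c_r14 := w_r14
  have c_rbx := w_rbx
  have w_eq : Mem.EqOn Vorbis.L.textLo Vorbis.L.textHi u₀.mem v.mem := hfr.code
  have hdf : v.flags .df = false := (show abiInv _ from hfr.inv).1
  have hmx : v.mxcsr &&& 0x1F80 = 0x1F80 := (show abiInv _ from hfr.inv).2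
  have hsse := Vorbis.sseOK_of_abiInv hfr.inv
  clear g8 g13
  have hFt : 0x119d40 ≤ F := (hLf.where_ hshadow hfr.offText (by decide)).1
  have hct : 0x119d40 ≤ c := (hLc.where_ hshadow hfr.offText (by omega)).1
  obtain ⟨z, hz⟩ : ∃ z, v.reg .rax = z := ⟨_, rfl⟩
  have c_rax := hz
  rw [hz] at hrax
  rw [hresAt] at hr4 hr5 hr6
  have eB13 : (addr (c + 32 * i) + 13).toNat = c + 32 * i + 13 := toNat_addr_add _ 13 13 rfl (by omega)
  have eA13 := eq_addr _ _ eB13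
  have eBc : (addr F + 160).toNat = F + 160 := toNat_addr_add _ 160 160 rfl (by omega)
  obtain ⟨cb, hcb⟩ : ∃ cb, v.mem.u32 (F + 160) = cb := ⟨_, rfl⟩
  have rcb : v.mem.readLE (addr F + 160) 4 = cb := by
    rw [← hcb, eq_addr _ _ eBc]
    rfl
  u_walk hcode [hμ.vendor] until [Vorbis.L.start_decoder.cut255, Vorbis.L.start_decoder.cut248] span [Vorbis.L.textLo, Vorbis.L.textHi] side (v_side)
  case check_115b00 =>
    have hun : ShadowUntouched v.mem s_115b00.mem := by v_untouched
    exact hLc.accSmall hshadow hun _ 1 (by decide) (by rw [eB13]; omega) (by rw [eB13]; omega)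
  case check_115b14 =>
    have hun : ShadowUntouched v.mem s_115b14.mem := by v_untouched
    exact hLf.accSmall hshadow hun _ 4 (by decide) (by rw [eBc]; omega) (by rw [eBc]; omega)
  case call_inv => v_inv
  case pre_115b2e =>
    have hun : ShadowUntouched v.mem s_115b2e.mem := by v_untouched
    have eF : (addr F).toNat = F := toNat_addr F (by omega)
    refine errorPre hloop ?_ hun ?_
    · rw [w_rsp, hR]
      u_omega
    · rw [w_rdi, hF]
      exact eF
  · -- 0x115bdc = cut255: the entry of R4
    rw [eA13] at w_mem
    have hsame1 : Mem.SameExcept [⟨(g.e.reg .rsp).toNat - 1488, (g.e.reg .rsp).toNat - 1480⟩,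
        ⟨c + 32 * i + 13, c + 32 * i + 14⟩] v.mem s_115b20.mem := by
      rw [w_mem]
      u_same
    have hws1 : ∀ w, w ∈ [(⟨(g.e.reg .rsp).toNat - 1488, (g.e.reg .rsp).toNat - 1480⟩ : Span),
        ⟨c + 32 * i + 13, c + 32 * i + 14⟩] → SpanOwn g (resAt g v.mem i) i w := by
      intro w hw
      simp only [List.mem_cons, List.mem_nil_iff, or_false] at hw
      unfold SpanOwn
      rw [hRA, hR, hF, hresAt]
      rcases hw with rfl | rfl <;> simp only [] <;> omega
    have hws2 : ∀ w, w ∈ ([] : List Span) → SpanCallee g w := by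
      intro w hw
      cases hw
    have hs2 : Mem.SameExcept [] s_115b20.mem s_115b20.mem := Mem.SameExcept.refl _ _
    have hb := bitsOwn hloop (by rw [hF]; exact hlt) hsame1 hws1
    have hcar := carry2 (pc' := pc_R4) (s := s_115b20) hloop (by rw [hF]; exact hlt) hsame1 hs2 hws1 hws2 hb w_rip
      (by rw [hsteady]; exact w_rsp) w_eq (by v_inv)
    have eR : resAt g s_115b20.mem i = c + 32 * i := by
      unfold resAt stb_vorbis.residue_config_at
      rw [hcar.config, hF, hc]
      rfl
    have hkF := keepRange hloop hsame1 hs2 hws2 (F + 324 + 2 * i) (F + 326 + 2 * i)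
      (by rw [hF]; exact Or.inl ⟨by omega, by omega⟩)
      (by
        intro w hw
        simp only [List.mem_cons, List.mem_nil_iff, or_false] at hw
        rcases hw with rfl | rfl <;> simp only [] <;> omega)
    have hkC := keepRange hloop hsame1 hs2 hws2 (F + 160) (F + 164)
      (by rw [hF]; exact Or.inl ⟨by omega, by omega⟩)
      (by
        intro w hw
        simp only [List.mem_cons, List.mem_nil_iff, or_false] at hw
        rcases hw with rfl | rfl <;> simp only [] <;> omega)
    have hkR := keepRange hloop hsame1 hs2 hws2 (c + 32 * i) (c + 32 * i + 13)
      (by rw [hF, hc, hn]; exact Or.inr ⟨by omega, by omega⟩)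
      (by
        intro w hw
        simp only [List.mem_cons, List.mem_nil_iff, or_false] at hw
        rcases hw with rfl | rfl <;> simp only [] <;> omega)
    have hnew : s_115b20.mem.u8 (c + 32 * i + 13) = z.toNat := by
      rw [w_mem]
      rw [Mem.u8_writeLE _ _ _ _ _ (by u_omega) (by omega) (by clear g7 g12; u_omega)]
      rw [Mem.u8_writeLE_same, BitVec.toNat_setWidth, toNat_part32]
      omega
    have hcbs : s_115b20.mem.u32 (F + 160) = cb := by
      rw [hkC.u32 _ (Nat.le_refl _) (by omega) (by omega)]
      exact hcb
    have hlt7 := (jl_classbook z cb hrax (by rw [← hcb]; exact Mem.u32_lt _ _)).mp hbr_115b20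
    refine ReachVia.done (Or.inl ⟨A6, A6c, A, ⟨hcar.loop, ?rbp, ?r14, ?rbx, ?cur⟩⟩)
    case rbp =>
      rw [w_kept .rbp rfl]
      exact hst.rbp
    case r14 =>
      rw [w_kept .r14 rfl]
      exact hst.r14
    case rbx =>
      rw [w_kept .rbx rfl, eR]
      exact c_rbx
    case cur =>
      refine ⟨?lt, ?R3, ?R4, ?R5, ?R6, ?R7, fun h => absurd h (by decide), fun h => absurd h (by decide),
        fun h => absurd h (by decide)⟩
      case lt =>
        rw [hcar.count]
        exact hst.lt
      case R3 =>
        rw [hF]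
        simp only [stb_vorbis.residue_types, voff]
        rw [hkF.u16 _ (Nat.le_refl _) (by omega) (by omega)]
        exact hty
      case R4 =>
        rw [eR]
        simp only [Residue.begin, Residue.end_, voff]
        rw [hkR.u32 _ (by omega) (by omega) (by omega), hkR.u32 _ (by omega) (by omega) (by omega)]
        exact hr4
      case R5 =>
        rw [eR]
        simp only [Residue.part_size, voff]
        rw [hkR.u32 _ (by omega) (by omega) (by omega)]
        exact hr5
      case R6 =>
        rw [eR]
        simp only [Residue.classifications, voff]
        rw [hkR.u8 _ (by omega) (by omega) (by omega)]
        exact hr6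
      case R7 =>
        rw [eR, hF]
        simp only [Residue.classbook, stb_vorbis.codebook_count, voff, Mem.i32]
        rw [hnew, hcbs]
        exact hlt7
  · -- 0x115b33 = cut248: `error(f, VORBIS_invalid_setup)` returned; `jmp 113b22`
    simp only [X86.User.Spec.footprint, vspec, w_rsp_115b2e, w_rdi_115b2e] at w_same
    have eF : (addr F).toNat = F := toNat_addr F (by omega)
    have eSP : (g.e.reg .rsp - 1488).toNat = (g.e.reg .rsp).toNat - 1488 := by u_omega
    rw [eF, eSP] at w_same
    rw [eA13] at w_mem_115b2e
    have hsame1 : Mem.SameExcept [⟨(g.e.reg .rsp).toNat - 1488, (g.e.reg .rsp).toNat - 1480⟩,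
        ⟨c + 32 * i + 13, c + 32 * i + 14⟩] v.mem s_115b2e.mem := by
      rw [w_mem_115b2e]
      u_same
    have hws1 : ∀ w, w ∈ [(⟨(g.e.reg .rsp).toNat - 1488, (g.e.reg .rsp).toNat - 1480⟩ : Span),
        ⟨c + 32 * i + 13, c + 32 * i + 14⟩] → SpanOwn g (resAt g v.mem i) i w := by
      intro w hw
      simp only [List.mem_cons, List.mem_nil_iff, or_false] at hw
      unfold SpanOwn
      rw [hRA, hR, hF, hresAt]
      rcases hw with rfl | rfl <;> simp only [] <;> omega
    have hws2 := error_spans g (g.e.reg .rsp).toNat F hRA hR hF g3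
    have hb1 := bitsOwn hloop (by rw [hF]; exact hlt) hsame1 hws1
    have hbits : Bits (g.Blk A) g.len s_115b2er.mem g.f := by
      apply bitsError hfr hloop.hand hloop.mid.env.ok hloop.mid.arena hC hb1 w_same
      intro w hw
      have := hws2 w hw
      unfold SpanCallee at this
      simp only [List.mem_cons, List.mem_nil_iff, or_false] at hw
      rw [hRA, hR, hF]
      rcases hw with rfl | rfl <;> simp only [] <;> omega
    have hpost : s_115b2er.reg .rax = 0 := w_post.1
    have w_eq := Vorbis.conv_code_eqOn w_code
    have hdfr : s_115b2er.flags .df = false := (show X86.User.abiInv _ from w_inv).1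
    have hmxr : s_115b2er.mxcsr &&& 8064 = 8064 := (show X86.User.abiInv _ from w_inv).2
    have hsser := Vorbis.sseOK_of_abiInv w_inv
    have c_rax2 := hpost
    have c_rsp2 := w_rsp
    u_walk hcode [hμ.vendor] until [Vorbis.L.start_decoder.cut4] span [Vorbis.L.textLo, Vorbis.L.textHi] side (v_side)
    have hcar := carry2 (pc' := Vorbis.L.start_decoder.cut4) (s := s_115b33) hloop (by rw [hF]; exact hlt) hsame1
      (by rw [w_mem]; exact w_same) hws1 hws2 (by rw [w_mem]; exact hbits) w_rip
      (by rw [hsteady]; exact w_rsp) w_eq (by v_inv)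
    refine ReachVia.done (Or.inr ⟨A, hcar.loop.frame, hcar.loop.hand, Or.inl ⟨?_, failed_of_loop hcar.loop⟩⟩)
    rw [w_rax]
    rfl

end Vorbis.Spec.start_decoder_R3

/-- Segment R3 of `start_decoder`: from `AtR3` (0x1159f8) to `AtR4` (0x115bdc) or the epilogue `AtERR` (0x113b22). -/
theorem Vorbis.Spec.Worked.start_decoder_R3_ok : Vorbis.Spec.start_decoder_R3.Statement := by
  unfold Vorbis.Spec.start_decoder_R3.Statement
  intro Lay hLay μ hμ u₀ hcode h_load8 h_get_bits h_store2 h_error h_store4 h_load4 h_store1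
  unfold Vorbis.Spec.StartDecoder.SegR3
  intro g i v hat
  obtain ⟨A6, A6c, A, hb⟩ := hat
  -- 0x1159f8 … 0x115a22
  apply ReachVia.trans (Vorbis.Spec.start_decoder_R3.stage0 Lay hLay μ hμ u₀ hcode h_load8 h_get_bits g i A6 A6c A v hb)
  intro w1 h1
  obtain ⟨hs1, hr12⟩ := h1
  -- … 0x115a66
  apply ReachVia.trans (Vorbis.Spec.start_decoder_R3.stage1 Lay hLay μ hμ u₀ hcode h_get_bits h_store2 h_error g i A6 A6c A w1 hs1 hr12)
  intro w2 h2
  rcases h2 with ⟨hs2, hty2, hrax2⟩ | herr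
  case inr => exact ReachVia.done (Or.inr herr)
  -- … 0x115a81
  apply ReachVia.trans (Vorbis.Spec.start_decoder_R3.stage2 Lay hLay μ hμ u₀ hcode h_get_bits h_store4 g i A6 A6c A w2 hs2 hty2 hrax2)
  intro w3 h3
  obtain ⟨hs3, hty3, hbeg3, hrax3⟩ := h3
  -- … 0x115abd
  apply ReachVia.trans (Vorbis.Spec.start_decoder_R3.stage3 Lay hLay μ hμ u₀ hcode h_get_bits h_error h_store4 h_load4 g i A6 A6c A w3
    hs3 hty3 hbeg3 hrax3)
  intro w4 h4
  rcases h4 with ⟨hs4, hty4, hr44, hrax4⟩ | herr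
  case inr => exact ReachVia.done (Or.inr herr)
  -- … 0x115adb
  apply ReachVia.trans (Vorbis.Spec.start_decoder_R3.stage4 Lay hLay μ hμ u₀ hcode h_get_bits h_error h_store4 h_load4 h_store1 g i A6 A6c A w4
    hs4 hty4 hr44 hrax4)
  intro w5 h5
  obtain ⟨hs5, hty5, hr45, hr55, hrax5⟩ := h5
  -- … 0x115af9
  apply ReachVia.trans (Vorbis.Spec.start_decoder_R3.stage5 Lay hLay μ hμ u₀ hcode h_get_bits h_error h_store4 h_load4 h_store1 g i A6 A6c A w5
    hs5 hty5 hr45 hr55 hrax5)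
  intro w6 h6
  obtain ⟨hs6, hty6, hr46, hr56, hr66, hrax6⟩ := h6
  -- … 0x115bdc (R4) or the epilogue
  exact Vorbis.Spec.start_decoder_R3.stage6 Lay hLay μ hμ u₀ hcode h_get_bits h_error h_store4 h_load4 h_store1 g i A6 A6c A w6
    hs6 hty6 hr46 hr56 hr66 hrax6
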